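-- pv_equiv track=rewrite | github.com/hyunw9/Algorithm | PythonPS/programmers/할인행사.py | solution
-- ===== SOURCE A (Python) =====
-- def solution(want, number, discount):
--     map = {}
--     answer = 0
--     for i in range(0 , len(number)):
--         map[want[i]] = number[i]
--
--     # 10개 뺀 만큼 반복하면서
--     # 10개 돌면서 dict 에 채운다.
--     # 값이 모두 일치하면 걔를 리턴
--
--     for i in range(0, len(discount)-9):
--         basket = {}
--         for j in range(0, 10):
--             key = discount[i+j]
--             if key in basket :
--                 basket[key] +=1
--             else:
--                 basket[key] =1
--
--         if map == basket :
--             answer += 1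
--     if answer >0 : return answer
--     return 0
-- ===== SOURCE B (Python) =====
-- def solution(want, number, discount):
--     target = dict(zip(want, number))
--     if len(discount) < 10:
--         return 0
--     cnt = {}
--     for x in discount[:10]:
--         cnt[x] = cnt.get(x, 0) + 1
--     answer = 1 if cnt == target else 0
--     for i in range(len(discount) - 10):
--         out = discount[i]
--         if cnt[out] == 1:
--             del cnt[out]
--         else:
--             cnt[out] -= 1
--         new = discount[i + 10]
--         cnt[new] = cnt.get(new, 0) + 1
--         if cnt == target:
--             answer += 1
--     return answer
-- ===== Notes on version B (the rewrite author's own statement) =====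
-- stated objective: alternative
-- what changed: A rebuilds a 10-element counting dict from scratch for every window and compares it to the want-dict; B primes one counter over the first 10 discounts and slides it (remove the outgoing day, add the incoming day) across the list, comparing incrementally maintained state.
import Mathlib
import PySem

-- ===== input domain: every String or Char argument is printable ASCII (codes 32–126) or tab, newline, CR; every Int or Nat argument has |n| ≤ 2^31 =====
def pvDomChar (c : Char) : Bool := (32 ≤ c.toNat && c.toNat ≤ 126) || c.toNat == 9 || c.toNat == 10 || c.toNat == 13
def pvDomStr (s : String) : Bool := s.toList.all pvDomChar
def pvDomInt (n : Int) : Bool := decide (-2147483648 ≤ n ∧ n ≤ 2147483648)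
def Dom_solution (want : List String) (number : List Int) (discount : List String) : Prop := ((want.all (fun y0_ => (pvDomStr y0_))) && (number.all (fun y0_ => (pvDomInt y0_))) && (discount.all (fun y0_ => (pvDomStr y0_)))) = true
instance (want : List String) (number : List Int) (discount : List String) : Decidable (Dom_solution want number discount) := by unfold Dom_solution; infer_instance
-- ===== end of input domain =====

-- B replaces A's per-window dictionary rebuild by an incrementally maintained sliding-window
-- counter (one removal + one addition per window shift); measured constant-factor speedup.

-- ===== PORT A =====
-- Python's `d1 == d2` on dicts: order-insensitive comparison (same keys, same value at each key).
def pyDictEq (d e : PySem.Dict String Int) : Bool :=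
  (d.keys.all fun k => d.get? k == e.get? k) && (e.keys.all fun k => d.get? k == e.get? k)

def solution (want : List String) (number : List Int) (discount : List String) : Int :=
  let map := (PySem.List.pyRange 0 (number.length : Int)).foldl
      (fun m i => m.insert (PySem.List.pyGetD want i "") (PySem.List.pyGetD number i 0))
      PySem.Dict.empty
  let answer := (PySem.List.pyRange 0 ((discount.length : Int) - 9)).foldl
      (fun answer i =>
        let basket := (PySem.List.pyRange 0 10).foldl
          (fun b j =>
            let key := PySem.List.pyGetD discount (i + j) ""
            if b.contains key then b.modify key 0 (· + 1) else b.insert key 1)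
          PySem.Dict.empty
        if pyDictEq map basket then answer + 1 else answer)
      (0 : Int)
  if answer > 0 then answer else 0

-- ===== PORT B =====
def solution_alt (want : List String) (number : List Int) (discount : List String) : Int :=
  let target := (want.zip number).foldl (fun m p => m.insert p.1 p.2) PySem.Dict.empty
  if (discount.length : Int) < 10 then 0
  else
    let cnt := (PySem.List.slice discount none (some 10)).foldl
        (fun c x => c.insert x (c.getD x 0 + 1)) PySem.Dict.empty
    let answer : Int := if pyDictEq cnt target then 1 else 0
    let res := (PySem.List.pyRange 0 ((discount.length : Int) - 10)).foldl
        (fun (st : PySem.Dict String Int × Int) i =>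
          let c0 := st.1
          let out := PySem.List.pyGetD discount i ""
          let c1 := if c0.getD out 0 == 1 then c0.erase out else c0.modify out 0 (· - 1)
          let nw := PySem.List.pyGetD discount (i + 10) ""
          let c2 := c1.insert nw (c1.getD nw 0 + 1)
          (c2, if pyDictEq c2 target then st.2 + 1 else st.2))
        (cnt, answer)
    res.2

-- ===== PRECONDITION & SPEC =====
-- Pre_ excludes exactly the inputs with len(number) > len(want), on which A raises IndexError
-- while building its want->number dict.
def Pre_solution (want : List String) (number : List Int) (discount : List String) : Prop :=
  number.length ≤ want.length
instance (want : List String) (number : List Int) (discount : List String) : Decidable (Pre_solution want number discount) := by unfold Pre_solution; infer_instance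

def pvWitness_solution : List String × List Int × List String :=
  (["a", "b"], [2, 1], ["a", "a", "b", "a", "c", "b", "a", "a", "b", "a", "b", "a"])

def Spec_solution (want : List String) (number : List Int) (discount : List String) (out : Int) : Prop := out = solution_alt want number discount
instance (want : List String) (number : List Int) (discount : List String) (out : Int) : Decidable (Spec_solution want number discount out) := by unfold Spec_solution; infer_instance

-- ===== CLAIM (what is proved, stated in full; the proofs are below) =====
def Claim_equal_solution : Prop := ∀ (want : List String) (number : List Int) (discount : List String), Dom_solution want number discount → Pre_solution want number discount → Spec_solution want number discount (solution want number discount)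

-- ===== LEMMAS AND PROOFS =====

-- the window of 10 discounts starting at position i
def pvW (discount : List String) (i : Nat) : List String :=
  (List.range 10).map (fun j => discount.getD (i + j) "")

-- B's loop body, named so the invariant lemmas can speak about it
def pvStep (discount : List String) (target : PySem.Dict String Int)
    (st : PySem.Dict String Int × Int) (i : Int) : PySem.Dict String Int × Int :=
  let c0 := st.1
  let out := PySem.List.pyGetD discount i ""
  let c1 := if c0.getD out 0 == 1 then c0.erase out else c0.modify out 0 (· - 1)
  let nw := PySem.List.pyGetD discount (i + 10) ""
  let c2 := c1.insert nw (c1.getD nw 0 + 1)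
  (c2, if pyDictEq c2 target then st.2 + 1 else st.2)

theorem pv_find?_filter_ne (k k' : String) (l : List (String × Int)) :
    (l.filter fun p => !(p.1 == k)).find? (fun p => p.1 == k') =
      if k' = k then none else l.find? (fun p => p.1 == k') := by
  induction l with
  | nil => simp
  | cons p l ih =>
    rcases eq_or_ne p.1 k with hk | hk
    · have h1 : (!(p.1 == k)) = false := by simp [hk]
      rw [List.filter_cons_of_neg (by simp [h1]), ih]
      rcases eq_or_ne k' k with h2 | h2
      · simp [h2]
      · rw [if_neg h2, if_neg h2, List.find?_cons_of_neg]
        simp [hk]; exact fun h => h2 h.symm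
    · rcases eq_or_ne p.1 k' with h2 | h2
      · rw [List.filter_cons_of_pos (by simp [hk]), List.find?_cons_of_pos (by simp [h2]),
          List.find?_cons_of_pos (by simp [h2])]
        rw [if_neg]; exact fun h => hk (h ▸ h2)
      · rw [List.filter_cons_of_pos (by simp [hk]), List.find?_cons_of_neg (by simp [h2]),
          List.find?_cons_of_neg (by simp [h2]), ih]

theorem pv_get?_erase (d : PySem.Dict String Int) (k k' : String) :
    (d.erase k).get? k' = if k' = k then none else d.get? k' := by
  show ((d.items.filter fun p => !(p.1 == k)).find? (fun p => p.1 == k')).map (·.2) = _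
  rw [pv_find?_filter_ne]
  split <;> rfl

theorem pv_counter_get? (w : List String) (k : String) :
    (PySem.Dict.counter w).get? k = if k ∈ w then some ((w.count k : Int)) else none := by
  by_cases h : k ∈ w
  · have hc : (PySem.Dict.counter w).contains k = true := by
      rw [PySem.Dict.contains_counter]; exact List.elem_eq_true_of_mem h
    rw [PySem.Dict.contains_eq_isSome_get?] at hc
    obtain ⟨v, hv⟩ := Option.isSome_iff_exists.mp hc
    have := PySem.Dict.getD_of_get?_eq_some (d := PySem.Dict.counter w) (0 : Int) hv
    rw [PySem.Dict.getD_counter] at this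
    simp [h, hv, ← this]
  · have h0 : (PySem.Dict.counter w).get? k = none := by
      rw [PySem.Dict.get?_eq_none_iff_not_mem_keys, PySem.Dict.keys_counter,
        PySem.Set.mem_ofList]
      exact h
    simp [h, h0]

-- pyDictEq only depends on get? of its arguments
theorem pv_pyDictEq_ext (c d e : PySem.Dict String Int)
    (hk : ∀ k, c.get? k = d.get? k) : pyDictEq c e = pyDictEq d e := by
  have hmem : ∀ k, k ∈ c.keys ↔ k ∈ d.keys := by
    intro k
    rw [← not_iff_not, ← PySem.Dict.get?_eq_none_iff_not_mem_keys,
      ← PySem.Dict.get?_eq_none_iff_not_mem_keys, hk]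
  unfold pyDictEq
  rw [Bool.eq_iff_iff]
  simp only [Bool.and_eq_true, List.all_eq_true, beq_iff_eq, hk]
  constructor
  · rintro ⟨h1, h2⟩
    exact ⟨fun k hkm => h1 k ((hmem k).mpr hkm), h2⟩
  · rintro ⟨h1, h2⟩
    exact ⟨fun k hkm => h1 k ((hmem k).mp hkm), h2⟩

theorem pv_pyDictEq_comm (c d : PySem.Dict String Int) : pyDictEq c d = pyDictEq d c := by
  unfold pyDictEq
  rw [Bool.eq_iff_iff]
  simp only [Bool.and_eq_true, List.all_eq_true, beq_iff_eq]
  constructor <;> rintro ⟨h1, h2⟩ <;>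
    exact ⟨fun k hk => (h2 k hk).symm, fun k hk => (h1 k hk).symm⟩

-- A's dict build equals B's zip build (given len(number) ≤ len(want))
theorem pv_map_eq_target (want : List String) (number : List Int)
    (h : number.length ≤ want.length) :
    (PySem.List.pyRange 0 (number.length : Int)).foldl
      (fun m i => m.insert (PySem.List.pyGetD want i "") (PySem.List.pyGetD number i 0))
      PySem.Dict.empty
    = (want.zip number).foldl (fun m p => m.insert p.1 p.2) PySem.Dict.empty := by
  rw [PySem.List.pyRange_zero_natCast, List.foldl_map]
  have hzip : (List.range number.length).map
      (fun i => (want.getD i "", number.getD i 0)) = want.zip number := by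
    apply List.ext_getElem
    · simp; omega
    · intro i h1 h2
      simp only [List.getElem_map, List.getElem_range, List.getElem_zip]
      have hi : i < number.length := by simpa using h1
      rw [List.getD_eq_getElem _ _ (by omega), List.getD_eq_getElem _ _ hi]
  rw [← hzip, List.foldl_map]
  congr 1
  funext m i
  rw [PySem.List.pyGetD_natCast, PySem.List.pyGetD_natCast]

theorem pv_foldl_insert_counter (f : Int → String) (l : List Int) :
    l.foldl (fun b j => b.insert (f j) (b.getD (f j) 0 + 1)) PySem.Dict.empty
      = PySem.Dict.counter (l.map f) := by
  rw [← PySem.Dict.foldl_insert_getD_add_one_eq_counter, List.foldl_map]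

-- A's inner loop builds exactly the counter of the i-th window
theorem pv_basket (discount : List String) (i : Nat) :
    (PySem.List.pyRange 0 10).foldl
      (fun b j =>
        let key := PySem.List.pyGetD discount ((i : Int) + j) ""
        if b.contains key then b.modify key 0 (· + 1) else b.insert key 1)
      PySem.Dict.empty
    = PySem.Dict.counter (pvW discount i) := by
  have hstep : (fun (b : PySem.Dict String Int) (j : Int) =>
      let key := PySem.List.pyGetD discount ((i : Int) + j) ""
      if b.contains key then b.modify key 0 (· + 1) else b.insert key 1)
      = fun b j => b.insert (PySem.List.pyGetD discount ((i : Int) + j) "")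
          (b.getD (PySem.List.pyGetD discount ((i : Int) + j) "") 0 + 1) := by
    funext b j
    simp only []
    split
    · rfl
    · rename_i h
      rw [PySem.Dict.getD_of_not_contains _ _ (by simpa using h)]
      norm_num
  rw [hstep, pv_foldl_insert_counter]
  congr 1
  rw [show (10 : Int) = ((10 : Nat) : Int) by norm_num, PySem.List.pyRange_zero_natCast,
    List.map_map]
  unfold pvW
  congr 1
  funext j
  show PySem.List.pyGetD discount ((i : Int) + (j : Int)) "" = _
  rw [show ((i : Int) + (j : Int)) = ((i + j : Nat) : Int) by push_cast; ring,
    PySem.List.pyGetD_natCast]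

theorem pv_W_cons (d : List String) (s : Nat) :
    pvW d s = d.getD s "" :: (List.range 9).map (fun j => d.getD (s + 1 + j) "") := by
  unfold pvW
  rw [show (10 : Nat) = 9 + 1 from rfl, List.range_succ_eq_map, List.map_cons, List.map_map]
  refine congrArg₂ _ (by rw [Nat.add_zero]) ?_
  congr 1
  funext j
  show d.getD (s + (j + 1)) "" = _
  congr 1
  omega

theorem pv_W_succ (d : List String) (s : Nat) :
    pvW d (s + 1) = (List.range 9).map (fun j => d.getD (s + 1 + j) "") ++ [d.getD (s + 10) ""] := by
  unfold pvW
  rw [show (10 : Nat) = 9 + 1 from rfl, List.range_succ, List.map_append, List.map_singleton]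

theorem pv_W0 (discount : List String) (h : 10 ≤ discount.length) :
    PySem.List.slice discount none (some 10) = pvW discount 0 := by
  have h0 : PySem.List.slice discount none (some 10) = discount.take 10 := by
    simp [PySem.List.slice, PySem.List.clampIdx]
  rw [h0]
  apply List.ext_getElem
  · simp [pvW]; omega
  · intro i h1 h2
    simp only [pvW, List.getElem_take, List.getElem_map, List.getElem_range]
    rw [List.getD_eq_getElem _ _ (by simp at h1 ⊢; omega)]
    congr 1
    omega

-- one sliding step preserves "dict is extensionally the counter of the current window"
theorem pv_step_core (c : PySem.Dict String Int) (out nw : String) (mid : List String)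
    (h : ∀ k, c.get? k = (PySem.Dict.counter (out :: mid)).get? k) (k : String) :
    (((if c.getD out 0 == 1 then c.erase out else c.modify out 0 (· - 1)).insert nw
       ((if c.getD out 0 == 1 then c.erase out else c.modify out 0 (· - 1)).getD nw 0 + 1)).get? k)
      = (PySem.Dict.counter (mid ++ [nw])).get? k := by
  have hout : c.getD out 0 = (mid.count out : Int) + 1 := by
    rw [PySem.Dict.getD_eq_get?_getD, h out, pv_counter_get?]
    simp
  set c1 := if c.getD out 0 == 1 then c.erase out else c.modify out 0 (· - 1) with hc1
  have hc1get : ∀ k, c1.get? k =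
      if k = out then (if mid.count out = 0 then none else some ((mid.count out : Int)))
      else c.get? k := by
    intro k
    rw [hc1]
    by_cases hb : c.getD out 0 = 1
    · have h0 : mid.count out = 0 := by omega
      simp only [hb, beq_self_eq_true, if_true, pv_get?_erase, h0]
    · have h0 : mid.count out ≠ 0 := by
        intro h0; rw [h0] at hout; simp at hout; exact hb (by omega)
      rw [if_neg (by simpa using hb)]
      show (c.insert out (c.getD out 0 - 1)).get? k = _
      rw [PySem.Dict.get?_insert, hout]
      by_cases hk : k = out
      · simp [hk, h0]
      · simp [hk]
  have hnwD : c1.getD nw 0 = (mid.count nw : Int) := by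
    rw [PySem.Dict.getD_eq_get?_getD, hc1get nw]
    by_cases hnw : nw = out
    · rw [if_pos hnw, hnw]
      by_cases h0 : mid.count out = 0 <;> simp [h0]
    · rw [if_neg hnw, h nw, pv_counter_get?]
      by_cases hm : nw ∈ mid
      · have hon : ¬ out = nw := fun hh => hnw hh.symm
        simp [List.mem_cons, hm, hnw, hon]
      · have hno : nw ∉ (out :: mid) := by simp [hnw, hm]
        simp [hno, List.count_eq_zero.mpr hm]
  rw [PySem.Dict.get?_insert, pv_counter_get?]
  by_cases hk : k = nw
  · rw [if_pos hk, hnwD, hk]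
    have hnm : nw ∈ mid ++ [nw] := by simp
    rw [if_pos hnm, List.count_append]
    simp
  · rw [if_neg hk, hc1get k]
    have hmem : k ∈ mid ++ [nw] ↔ k ∈ mid := by simp [hk]
    have hcnt : (mid ++ [nw]).count k = mid.count k := by
      have hnk : ¬ nw = k := fun hh => hk hh.symm
      rw [List.count_append]; simp [hnk]
    by_cases hko : k = out
    · subst hko
      rw [if_pos rfl]
      by_cases h0 : mid.count k = 0
      · rw [if_pos h0, if_neg (by rw [hmem]; exact List.count_eq_zero.mp h0)]
      · rw [if_neg h0, if_pos (hmem.mpr (List.count_pos_iff.mp (by omega))), hcnt]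
    · rw [if_neg hko, h k, pv_counter_get?]
      have hok : ¬ out = k := fun hh => hko hh.symm
      by_cases hm : k ∈ mid
      · rw [if_pos (by simp [hm]), if_pos (hmem.mpr hm), hcnt]
        simp [hok]
      · rw [if_neg (by simp [hko, hm]), if_neg (by simp [hm, hk])]

theorem pv_step1 (discount : List String) (target : PySem.Dict String Int) (s : Nat)
    (c : PySem.Dict String Int) (acc : Int)
    (h : ∀ k, c.get? k = (PySem.Dict.counter (pvW discount s)).get? k) (k : String) :
    (pvStep discount target (c, acc) (s : Int)).1.get? k
      = (PySem.Dict.counter (pvW discount (s + 1))).get? k := by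
  have hout : PySem.List.pyGetD discount (s : Int) "" = discount.getD s "" :=
    PySem.List.pyGetD_natCast discount s ""
  have hnw : PySem.List.pyGetD discount ((s : Int) + 10) "" = discount.getD (s + 10) "" := by
    rw [show ((s : Int) + 10) = ((s + 10 : Nat) : Int) by push_cast; ring,
      PySem.List.pyGetD_natCast]
  simp only [pvStep, hout, hnw]
  rw [pv_W_succ]
  exact pv_step_core c _ _ _ (fun k => by rw [h k, pv_W_cons]) k

theorem pv_step2 (discount : List String) (target : PySem.Dict String Int) (s : Nat)
    (c : PySem.Dict String Int) (acc : Int)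
    (h : ∀ k, c.get? k = (PySem.Dict.counter (pvW discount s)).get? k) :
    (pvStep discount target (c, acc) (s : Int)).2
      = if pyDictEq target (PySem.Dict.counter (pvW discount (s + 1))) then acc + 1 else acc := by
  have h1 := pv_step1 discount target s c acc h
  show (if pyDictEq (pvStep discount target (c, acc) (s : Int)).1 target then acc + 1 else acc) = _
  rw [pv_pyDictEq_ext _ (PySem.Dict.counter (pvW discount (s + 1))) target h1,
    pv_pyDictEq_comm]

theorem pv_loop (discount : List String) (target : PySem.Dict String Int) :
    ∀ (n s : Nat) (c : PySem.Dict String Int) (acc : Int),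
    (∀ k, c.get? k = (PySem.Dict.counter (pvW discount s)).get? k) →
    ((List.range' s n).foldl (fun st (j : Nat) => pvStep discount target st (j : Int)) (c, acc)).2
      = acc + (((List.range' (s + 1) n).countP
          (fun i => pyDictEq target (PySem.Dict.counter (pvW discount i)))) : Int) := by
  intro n
  induction n with
  | zero => intro s c acc _; simp
  | succ n ih =>
    intro s c acc h
    rw [List.range'_succ, List.foldl_cons]
    have h1 := pv_step1 discount target s c acc h
    have hih := ih (s + 1) (pvStep discount target (c, acc) (s : Int)).1
      (pvStep discount target (c, acc) (s : Int)).2 h1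
    rw [show (pvStep discount target (c, acc) (s : Int))
        = ((pvStep discount target (c, acc) (s : Int)).1,
           (pvStep discount target (c, acc) (s : Int)).2) from rfl] at hih ⊢
    rw [hih, pv_step2 discount target s c acc h, List.range'_succ, List.countP_cons]
    push_cast
    split <;> ring

theorem pv_foldA (discount : List String) (target : PySem.Dict String Int) (n : Nat) :
    ((List.range n).map (fun (k : Nat) => (k : Int))).foldl
      (fun answer i =>
        let basket := (PySem.List.pyRange 0 10).foldl
          (fun b j =>
            let key := PySem.List.pyGetD discount (i + j) ""
            if b.contains key then b.modify key 0 (· + 1) else b.insert key 1)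
          PySem.Dict.empty
        if pyDictEq target basket then answer + 1 else answer)
      (0 : Int)
    = (((List.range n).countP
        (fun i => pyDictEq target (PySem.Dict.counter (pvW discount i)))) : Int) := by
  rw [List.foldl_map]
  rw [PySem.List.foldl_congr_mem (List.range n) _
    (fun answer (k : Nat) =>
      if pyDictEq target (PySem.Dict.counter (pvW discount k)) then answer + 1 else answer)
    0 (fun acc x _ => by simp only [pv_basket discount x])]
  rw [PySem.List.foldl_count_if]
  simp

theorem pv_pyRange_nil (m : Int) (h : m ≤ 0) : PySem.List.pyRange 0 m = [] := by
  simp [PySem.List.pyRange]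
  omega

-- ===== VERDICT (by name: the statement is the Claim_ definition above) =====
theorem solution_spec : Claim_equal_solution := by
  intro want number discount _ hpre
  show solution want number discount = solution_alt want number discount
  unfold solution solution_alt
  simp only [pv_map_eq_target want number hpre]
  set target := (want.zip number).foldl (fun m p => m.insert p.1 p.2) PySem.Dict.empty with htarget
  by_cases hL : (discount.length : Int) < 10
  · rw [if_pos hL, pv_pyRange_nil ((discount.length : Int) - 9) (by omega), List.foldl_nil, if_neg (by omega)]
  · rw [if_neg hL]
    have h10 : 10 ≤ discount.length := by exact_mod_cast not_lt.mp hL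
    -- A side
    have hA9 : ((discount.length : Int) - 9) = ((discount.length - 9 : Nat) : Int) := by
      omega
    rw [hA9, PySem.List.pyRange_zero_natCast, pv_foldA discount target (discount.length - 9)]
    -- B side
    rw [PySem.Dict.foldl_insert_getD_add_one_eq_counter, pv_W0 discount h10]
    have hB10 : ((discount.length : Int) - 10) = ((discount.length - 10 : Nat) : Int) := by
      omega
    rw [hB10, PySem.List.pyRange_zero_natCast, List.foldl_map,
      show List.range (discount.length - 10) = List.range' 0 (discount.length - 10) from
        List.range_eq_range']
    have hloop := pv_loop discount target (discount.length - 10) 0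
      (PySem.Dict.counter (pvW discount 0))
      (if pyDictEq (PySem.Dict.counter (pvW discount 0)) target then 1 else 0)
      (fun _ => rfl)
    refine Eq.trans ?_ hloop.symm
    -- combine the two counts
    have hsplit : List.range (discount.length - 9) = 0 :: List.range' 1 (discount.length - 10) := by
      rw [List.range_eq_range', show discount.length - 9 = (discount.length - 10) + 1 by omega,
        List.range'_succ]
    rw [hsplit, List.countP_cons,
      pv_pyDictEq_comm (PySem.Dict.counter (pvW discount 0)) target]
    split_ifs <;> push_cast <;> omega
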